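-- pv_equiv track=rewrite | github.com/hospitaler17/auto_quoter | src/core/selection.py | select_quote_for_length
-- ===== SOURCE A (Python) =====
-- from typing import Any, Dict, List, Optional, Tuple
--
-- def format_status_message(quote: Optional[str], source: Optional[str]) -> Optional[str]:
--     if not quote:
--         return None
--     if source:
--         return f'"{quote}" — {source}'
--     return f'"{quote}"'
--
-- def select_quote_for_length(
--     candidates: List[Dict[str, Optional[str]]],
--     max_status_length: int,
-- ) -> Tuple[Optional[Dict[str, Optional[str]]], Optional[str]]:
--     """Возвращает первую цитату, которая помещается в лимит, либо первую доступную."""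
--
--     fallback_entry: Optional[Dict[str, Optional[str]]] = None
--     fallback_message: Optional[str] = None
--
--     for entry in candidates:
--         message = format_status_message(entry.get('quote'), entry.get('source'))
--         if not message:
--             continue
--
--         if fallback_entry is None:
--             fallback_entry = entry
--             fallback_message = message
--
--         if len(message) <= max_status_length:
--             return entry, message
--
--     return fallback_entry, fallback_message
-- ===== SOURCE B (Python) =====
-- from typing import Dict, List, Optional, Tuple
--
-- def format_status_message(quote: Optional[str], source: Optional[str]) -> Optional[str]:
--     if not quote:
--         return None
--     if source:
--         return f'"{quote}" — {source}'
--     return f'"{quote}"'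
--
-- def select_quote_for_length(
--     candidates: List[Dict[str, Optional[str]]],
--     max_status_length: int,
-- ) -> Tuple[Optional[Dict[str, Optional[str]]], Optional[str]]:
--     valid = []
--     for entry in candidates:
--         message = format_status_message(entry.get('quote'), entry.get('source'))
--         if message:
--             valid.append((entry, message))
--     fit = next(((e, m) for (e, m) in valid if len(m) <= max_status_length), None)
--     if fit is not None:
--         return fit
--     return valid[0] if valid else (None, None)
-- ===== Notes on version B (the rewrite author's own statement) =====
-- stated objective: alternative
-- what changed: B first materialises all valid (entry, message) pairs in one pass, then looks up the first one that fits and falls back to valid[0], instead of A's single scan that threads a running fallback and early-returns.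
import Mathlib
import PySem

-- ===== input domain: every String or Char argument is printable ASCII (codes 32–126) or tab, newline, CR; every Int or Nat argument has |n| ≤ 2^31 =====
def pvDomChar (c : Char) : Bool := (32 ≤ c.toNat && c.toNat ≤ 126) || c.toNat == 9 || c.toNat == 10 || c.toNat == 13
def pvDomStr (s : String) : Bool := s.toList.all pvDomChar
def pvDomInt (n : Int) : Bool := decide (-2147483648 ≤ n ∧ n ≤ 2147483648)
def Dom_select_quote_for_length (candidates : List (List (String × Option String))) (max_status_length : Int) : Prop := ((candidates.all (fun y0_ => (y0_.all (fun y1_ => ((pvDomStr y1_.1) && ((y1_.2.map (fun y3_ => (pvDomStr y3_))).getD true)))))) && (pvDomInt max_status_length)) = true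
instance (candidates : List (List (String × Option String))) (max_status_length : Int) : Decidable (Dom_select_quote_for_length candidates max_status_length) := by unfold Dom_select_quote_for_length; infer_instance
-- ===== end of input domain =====

-- B materialises all valid (entry, message) pairs first, then queries, instead of A's
-- single scan with a running fallback; same O(n), different decomposition.

-- ===== PORT A =====
-- entry.get(k): first match in the association list, value may itself be None
def pvGetKey (entry : List (String × Option String)) (k : String) : Option String :=
  (entry.find? (fun p => p.1 == k)).bind (fun p => p.2)

-- format_status_message, shared helper of both Pythons (built on List Char, exact for len)
def format_status_message (quote source : Option String) : Option String :=
  match quote with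
  | none => none
  | some q =>
    if q.toList = [] then none          -- 'not quote' (empty string is falsy)
    else
      match source with
      | some s =>
        if s.toList = [] then some (String.ofList ('"' :: q.toList ++ ['"']))
        else some (String.ofList ('"' :: q.toList ++ ['"', ' ', '—', ' '] ++ s.toList))
      | none => some (String.ofList ('"' :: q.toList ++ ['"']))

def goA (max_status_length : Int) :
    List (List (String × Option String)) →
    (Option (List (String × Option String)) × Option String) →
    (Option (List (String × Option String)) × Option String)
  | [], fb => fb
  | entry :: rest, fb =>
    match format_status_message (pvGetKey entry "quote") (pvGetKey entry "source") with
    | none => goA max_status_length rest fb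
    | some m =>
      if m.toList = [] then goA max_status_length rest fb    -- 'not message'
      else
        let fb' := if fb.1 = none then (some entry, some m) else fb
        if PySem.Str.len m ≤ max_status_length then (some entry, some m)
        else goA max_status_length rest fb'

def select_quote_for_length (candidates : List (List (String × Option String))) (max_status_length : Int) : (Option (List (String × Option String))) × Option String :=
  goA max_status_length candidates (none, none)

-- ===== PORT B =====
def validOf (candidates : List (List (String × Option String))) :
    List ((List (String × Option String)) × String) :=
  candidates.filterMap (fun entry =>
    match format_status_message (pvGetKey entry "quote") (pvGetKey entry "source") with
    | none => none
    | some m => if m.toList = [] then none else some (entry, m))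

def select_quote_for_length_alt (candidates : List (List (String × Option String))) (max_status_length : Int) : (Option (List (String × Option String))) × Option String :=
  let valid := validOf candidates
  match valid.find? (fun p => decide (PySem.Str.len p.2 ≤ max_status_length)) with
  | some (e, m) => (some e, some m)
  | none =>
    match valid with
    | [] => (none, none)
    | (e, m) :: _ => (some e, some m)

-- ===== PRECONDITION & SPEC =====
def Spec_select_quote_for_length (candidates : List (List (String × Option String))) (max_status_length : Int) (out : (Option (List (String × Option String))) × Option String) : Prop := out = select_quote_for_length_alt candidates max_status_length
instance (candidates : List (List (String × Option String))) (max_status_length : Int) (out : (Option (List (String × Option String))) × Option String) : Decidable (Spec_select_quote_for_length candidates max_status_length out) := by unfold Spec_select_quote_for_length; infer_instance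

-- ===== CLAIM (what is proved, stated in full; the proofs are below) =====
def Claim_equal_select_quote_for_length : Prop := ∀ (candidates : List (List (String × Option String))) (max_status_length : Int), Dom_select_quote_for_length candidates max_status_length → Spec_select_quote_for_length candidates max_status_length (select_quote_for_length candidates max_status_length)

-- ===== LEMMAS AND PROOFS =====

-- once the fallback is set, A's scan just looks for the first fitting valid pair
theorem goA_some (max : Int) (l : List (List (String × Option String)))
    (e0 : List (String × Option String)) (m0 : String) :
    goA max l (some e0, some m0) =
      match (validOf l).find? (fun p => decide (PySem.Str.len p.2 ≤ max)) with
      | some (e, m) => (some e, some m)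
      | none => (some e0, some m0) := by
  induction l with
  | nil => simp [goA, validOf]
  | cons entry rest ih =>
    cases hf : format_status_message (pvGetKey entry "quote") (pvGetKey entry "source") with
    | none => simp [goA, validOf, hf, ih]
    | some m =>
      by_cases hm : m = ""
      · simp [goA, validOf, hf, hm, ih]
      · have hm' : ¬ m.toList = [] := by simpa using hm
        by_cases hlen : ((m.length : Int) ≤ max)
        · simp [goA, validOf, hf, hm, hm', hlen]
        · simp [goA, validOf, hf, hm, hm', hlen, ih]

-- no fallback yet: A's scan equals B's query over the materialised valid list
theorem goA_none (max : Int) (l : List (List (String × Option String))) :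
    goA max l (none, none) = select_quote_for_length_alt l max := by
  induction l with
  | nil => simp [goA, select_quote_for_length_alt, validOf]
  | cons entry rest ih =>
    cases hf : format_status_message (pvGetKey entry "quote") (pvGetKey entry "source") with
    | none => simp [goA, select_quote_for_length_alt, validOf, hf, ih]
    | some m =>
      by_cases hm : m = ""
      · simp [goA, select_quote_for_length_alt, validOf, hf, hm, ih]
      · have hm' : ¬ m.toList = [] := by simpa using hm
        by_cases hlen : ((m.length : Int) ≤ max)
        · simp [goA, select_quote_for_length_alt, validOf, hf, hm, hm', hlen]
        · have hs := goA_some max rest entry m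
          simp [goA, select_quote_for_length_alt, validOf, hf, hm, hm', hlen, hs]

-- ===== VERDICT (by name: the statement is the Claim_ definition above) =====
theorem select_quote_for_length_spec : Claim_equal_select_quote_for_length := by
  intro candidates max _
  unfold Spec_select_quote_for_length select_quote_for_length
  exact goA_none max candidates
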